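-- pv_equiv track=rewrite | github.com/diegoaleman/ciu-old | algorithms/other/longest-repeated-subsequence.py | LRS
-- ===== SOURCE A (Python) =====
-- def LRS(l):
--     screening = set()
--     result = []
--
--     for letter in l:
--         if letter in screening:
--             result.append(letter)
--         else:
--             screening.add(letter)
--     return''.join(result)
-- ===== SOURCE B (Python) =====
-- def LRS(l):
--     # Pass 1: index table of first occurrences, then the set of those positions.
--     first = {}
--     for i, c in enumerate(l):
--         if c not in first:
--             first[c] = i
--     firsts = set(first.values())
--     # Pass 2: positional filter -- keep every character whose index is not a first occurrence.
--     return ''.join(c for i, c in enumerate(l) if i not in firsts)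
-- ===== Notes on version B (the rewrite author's own statement) =====
-- stated objective: alternative
-- what changed: Replaced A's single stateful seen-set loop by two staged passes: pass 1 builds a char-to-first-index table and collects the set of first-occurrence positions; pass 2 filters by position, emitting l[i] for every index that is not a first occurrence.
import Mathlib
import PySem

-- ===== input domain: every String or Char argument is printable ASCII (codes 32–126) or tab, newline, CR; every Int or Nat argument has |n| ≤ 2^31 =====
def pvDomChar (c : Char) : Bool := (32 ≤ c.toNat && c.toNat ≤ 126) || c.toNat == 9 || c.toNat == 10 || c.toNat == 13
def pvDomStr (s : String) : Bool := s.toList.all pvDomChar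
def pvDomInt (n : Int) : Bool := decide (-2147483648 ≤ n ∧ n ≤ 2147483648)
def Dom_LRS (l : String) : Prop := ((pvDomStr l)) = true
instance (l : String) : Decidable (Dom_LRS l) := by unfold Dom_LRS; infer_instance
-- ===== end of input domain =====

-- B replaces A's single stateful seen-set loop by two staged passes: a char->first-index
-- table plus the set of first-occurrence positions, then a positional filter (alternative decomposition).


-- ===== PORT A =====
-- for letter in l: if letter in screening: result.append(letter) else screening.add(letter)
def LRS (l : String) : String :=
  String.ofList
    (l.toList.foldl
      (fun (st : PySem.Set Char × List Char) letter =>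
        if PySem.Set.contains st.1 letter then (st.1, st.2 ++ [letter])
        else (PySem.Set.add st.1 letter, st.2))
      (PySem.Set.empty, [])).2   -- ''.join(result), result a list of single characters

-- ===== PORT B =====
-- pass 1: 'for i, c in enumerate(l): if c not in first: first[c] = i' then 'firsts = set(first.values())'
-- pass 2: ''.join(c for i, c in enumerate(l) if i not in firsts)
def LRS_alt (l : String) : String :=
  let first : PySem.Dict Char Int :=
    (PySem.List.enumerate l.toList 0).foldl
      (fun d p => if PySem.Dict.contains d p.2 then d else PySem.Dict.insert d p.2 p.1)
      PySem.Dict.empty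
  let firsts : PySem.Set Int := PySem.Set.ofList (PySem.Dict.values first)
  String.ofList ((PySem.List.enumerate l.toList 0).filterMap
    (fun p => if PySem.Set.contains firsts p.1 then none else some p.2))

-- ===== PRECONDITION & SPEC =====
def Spec_LRS (l : String) (out : String) : Prop := out = LRS_alt l
instance (l : String) (out : String) : Decidable (Spec_LRS l out) := by unfold Spec_LRS; infer_instance

-- ===== CLAIM (what is proved, stated in full; the proofs are below) =====
def Claim_equal_LRS : Prop := ∀ (l : String), Dom_LRS l → Spec_LRS l (LRS l)

-- ===== LEMMAS AND PROOFS =====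

-- A's loop body, extracted as a recursion on the remaining characters (state threaded explicitly).
def pickLRS : PySem.Set Char → List Char → List Char
  | _, [] => []
  | s, c :: cs => if PySem.Set.contains s c then c :: pickLRS s cs else pickLRS (PySem.Set.add s c) cs

-- A's foldl accumulates r ++ pickLRS s cs.
theorem foldl_eq_pickLRS (cs : List Char) : ∀ (s : PySem.Set Char) (r : List Char),
    (cs.foldl
      (fun (st : PySem.Set Char × List Char) letter =>
        if PySem.Set.contains st.1 letter then (st.1, st.2 ++ [letter])
        else (PySem.Set.add st.1 letter, st.2))
      (s, r)).2 = r ++ pickLRS s cs := by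
  induction cs with
  | nil => intro s r; simp [pickLRS]
  | cons c cs ih =>
    intro s r
    rw [List.foldl_cons]
    by_cases h : c ∈ s
    · rw [if_pos (by simp [h]), ih]
      simp [pickLRS, h]
    · rw [if_neg (by simp [h]), ih]
      simp [pickLRS, h]

-- Values of B's first-occurrence dict: j occurs iff j is the (shifted) position of a
-- character not seen before it.
theorem values_firstFold : ∀ (cs pre : List Char) (d : PySem.Dict Char Int),
    (∀ c, PySem.Dict.contains d c = decide (c ∈ pre)) →
    ∀ j : Int,
      (j ∈ PySem.Dict.values ((PySem.List.enumerate cs (pre.length : Int)).foldl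
        (fun (d : PySem.Dict Char Int) (p : Int × Char) =>
          if PySem.Dict.contains d p.2 then d else PySem.Dict.insert d p.2 p.1) d))
      ↔ j ∈ d.values ∨ ∃ k : Nat, ∃ _ : k < cs.length,
          j = (pre.length : Int) + k ∧ cs[k] ∉ pre ++ cs.take k := by
  intro cs
  induction cs with
  | nil => intro pre d _ j; simp [PySem.List.enumerate_nil]
  | cons c cs ih =>
    intro pre d hd j
    rw [PySem.List.enumerate_cons, List.foldl_cons]
    by_cases hc : c ∈ pre
    · rw [if_pos (by rw [hd]; simp [hc])]
      have hcontains : ∀ x, PySem.Dict.contains d x = decide (x ∈ pre ++ [c]) := by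
        intro x; rw [hd]
        by_cases hx : x = c
        · subst hx; simp [hc]
        · simp [hx]
      have hIH := ih (pre ++ [c]) d hcontains j
      have hlen : (((pre ++ [c]).length : Nat) : Int) = (pre.length : Int) + 1 := by simp
      rw [hlen] at hIH
      rw [hIH]
      constructor
      · rintro (h | ⟨k, hk, hj, hmem⟩)
        · exact Or.inl h
        · refine Or.inr ⟨k + 1, by simpa using Nat.succ_lt_succ hk, by push_cast; omega, ?_⟩
          simpa [List.append_assoc] using hmem
      · rintro (h | ⟨k, hk, hj, hmem⟩)
        · exact Or.inl h
        · cases k with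
          | zero => exact absurd hc (by simpa using hmem)
          | succ k =>
            refine Or.inr ⟨k, by simp only [List.length_cons] at hk; omega, by push_cast at hj ⊢; omega, ?_⟩
            simpa [List.append_assoc] using hmem
    · rw [if_neg (by rw [hd]; simp [hc])]
      have hcontains : ∀ x,
          PySem.Dict.contains (PySem.Dict.insert d c (pre.length : Int)) x
            = decide (x ∈ pre ++ [c]) := by
        intro x
        rw [PySem.Dict.contains_insert, hd]
        by_cases hx : x = c
        · subst hx; simp
        · simp [hx]
      have hIH := ih (pre ++ [c]) (PySem.Dict.insert d c (pre.length : Int)) hcontains j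
      have hlen : (((pre ++ [c]).length : Nat) : Int) = (pre.length : Int) + 1 := by simp
      rw [hlen] at hIH
      rw [hIH]
      have hvals : PySem.Dict.values (PySem.Dict.insert d c (pre.length : Int))
          = d.values ++ [(pre.length : Int)] := by
        have := PySem.Dict.items_insert_of_not_contains (d := d)
          (k := c) (v := (pre.length : Int)) (by rw [hd]; simp [hc])
        simp [PySem.Dict.values, this]
      rw [hvals]
      constructor
      · rintro (h | ⟨k, hk, hj, hmem⟩)
        · rcases List.mem_append.1 h with h | h
          · exact Or.inl h
          · refine Or.inr ⟨0, by simp, by simpa using h, by simpa using hc⟩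
        · refine Or.inr ⟨k + 1, by simpa using Nat.succ_lt_succ hk, by push_cast; omega, ?_⟩
          simpa [List.append_assoc] using hmem
      · rintro (h | ⟨k, hk, hj, hmem⟩)
        · exact Or.inl (List.mem_append.2 (Or.inl h))
        · cases k with
          | zero => exact Or.inl (List.mem_append.2 (Or.inr (by simpa using hj)))
          | succ k =>
            refine Or.inr ⟨k, by simp only [List.length_cons] at hk; omega, by push_cast at hj ⊢; omega, ?_⟩
            simpa [List.append_assoc] using hmem

-- Specialisation: membership in the set of first-occurrence positions of L.
theorem mem_firsts (L : List Char) (j : Nat) (hj : j < L.length) :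
    ((j : Int) ∈ PySem.Dict.values
        ((PySem.List.enumerate L 0).foldl
          (fun d p => if PySem.Dict.contains d p.2 then d else PySem.Dict.insert d p.2 p.1)
          PySem.Dict.empty))
      ↔ L[j] ∉ L.take j := by
  have h := values_firstFold L [] PySem.Dict.empty (by intro c; simp) (j : Int)
  simp only [List.length_nil, Nat.cast_zero] at h
  rw [h]
  constructor
  · rintro (h | ⟨k, hk, hjk, hmem⟩)
    · simp [PySem.Dict.empty, PySem.Dict.values] at h
    · have : k = j := by omega
      subst this
      simpa using hmem
  · intro hmem
    exact Or.inr ⟨j, hj, by omega, by simpa using hmem⟩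

-- A's remaining loop equals B's positional filter on the remaining suffix.
theorem pickLRS_eq_filter (L : List Char) : ∀ (cs pre : List Char) (s : PySem.Set Char),
    pre ++ cs = L → (∀ x, PySem.Set.contains s x = decide (x ∈ pre)) →
    pickLRS s cs = (PySem.List.enumerate cs (pre.length : Int)).filterMap
      (fun p => if PySem.Set.contains
          (PySem.Set.ofList (PySem.Dict.values
            ((PySem.List.enumerate L 0).foldl
              (fun d q => if PySem.Dict.contains d q.2 then d else PySem.Dict.insert d q.2 q.1)
              PySem.Dict.empty))) p.1
        then none else some p.2) := by
  intro cs
  induction cs with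
  | nil => intro pre s _ _; simp [pickLRS, PySem.List.enumerate_nil]
  | cons c cs ih =>
    intro pre s hL hs
    rw [PySem.List.enumerate_cons, List.filterMap_cons]
    have hlt : pre.length < L.length := by rw [← hL]; simp
    have hget : L[pre.length]'hlt = c := by
      subst hL; simp
    have htake : L.take pre.length = pre := by rw [← hL]; exact List.take_left
    have hfst : PySem.Set.contains
        (PySem.Set.ofList (PySem.Dict.values
          ((PySem.List.enumerate L 0).foldl
            (fun d q => if PySem.Dict.contains d q.2 then d else PySem.Dict.insert d q.2 q.1)
            PySem.Dict.empty))) ((pre.length : Nat) : Int)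
        = decide (c ∉ pre) := by
      rw [PySem.Set.contains_eq_decide]
      have := mem_firsts L pre.length hlt
      rw [hget, htake] at this
      simp [PySem.Set.mem_ofList, this]
    have hrec : ∀ (s' : PySem.Set Char), (∀ x, PySem.Set.contains s' x = decide (x ∈ pre ++ [c])) →
        pickLRS s' cs = (PySem.List.enumerate cs ((pre.length : Int) + 1)).filterMap
          (fun p => if PySem.Set.contains
              (PySem.Set.ofList (PySem.Dict.values
                ((PySem.List.enumerate L 0).foldl
                  (fun d q => if PySem.Dict.contains d q.2 then d else PySem.Dict.insert d q.2 q.1)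
                  PySem.Dict.empty))) p.1
            then none else some p.2) := by
      intro s' hs'
      have hlen : (((pre ++ [c]).length : Nat) : Int) = (pre.length : Int) + 1 := by simp
      have := ih (pre ++ [c]) s' (by simpa using hL) hs'
      rwa [hlen] at this
    by_cases hc : c ∈ pre
    · have hmem : PySem.Set.contains s c = true := by rw [hs]; simp [hc]
      have hs' : ∀ x, PySem.Set.contains s x = decide (x ∈ pre ++ [c]) := by
        intro x; rw [hs]
        by_cases hx : x = c
        · subst hx; simp [hc]
        · simp [hx]
      simp only [pickLRS, hmem, if_pos, hfst]
      rw [hrec s hs']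
      simp [hc]
    · have hmem : PySem.Set.contains s c = false := by rw [hs]; simp [hc]
      have hs' : ∀ x, PySem.Set.contains (PySem.Set.add s c) x = decide (x ∈ pre ++ [c]) := by
        intro x
        rw [PySem.Set.contains_eq_decide]
        have hx := hs x
        rw [PySem.Set.contains_eq_decide] at hx
        by_cases h : x = c
        · subst h; simp [PySem.Set.mem_add]
        · simp only [PySem.Set.mem_add]
          simp [h, decide_eq_decide.1 hx]
      simp only [pickLRS, hmem, Bool.false_eq_true, if_false, hfst]
      rw [hrec (PySem.Set.add s c) hs']
      simp [hc]

-- ===== VERDICT (by name: the statement is the Claim_ definition above) =====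
theorem LRS_spec : Claim_equal_LRS := by
  intro l _
  unfold Spec_LRS LRS LRS_alt
  congr 1
  rw [foldl_eq_pickLRS,
    pickLRS_eq_filter l.toList l.toList [] PySem.Set.empty rfl
      (by intro x; simp [PySem.Set.empty])]
  simp
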